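-- pv_equiv track=rewrite | github.com/nikolai3ldwin/Dashboards | indopacific_events/utils/simplified_ner.py | identify_relationships
-- ===== SOURCE A (Python) =====
-- def identify_relationships(text, entities):
--     """
--     Identify simple relationships between entities in the text.
--
--     Parameters:
--     -----------
--     text : str
--         Text content to analyze
--     entities : dict
--         Dictionary of entities by type
--
--     Returns:
--     --------
--     list
--         List of relationship dictionaries
--     """
--     relationships = []
--
--     # Skip if no entities or insufficient entities for relationships
--     flattened_entities = []
--     for entity_list in entities.values():
--         flattened_entities.extend(entity_list)
--
--     if len(flattened_entities) < 2:
--         return relationships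
--
--     # Define relationship keywords
--     relation_patterns = {
--         "cooperation": ["cooperation", "agreement", "partnership", "alliance", "deal", "treaty"],
--         "conflict": ["conflict", "tension", "dispute", "war", "confrontation", "clash"],
--         "economic": ["trade", "investment", "economic", "financial", "commerce"],
--         "diplomatic": ["diplomatic", "diplomacy", "talks", "negotiation", "meeting"],
--         "military": ["military", "defense", "security", "naval", "army", "forces"]
--     }
--
--     # Check each pair of entities for co-occurrence in sentences with relationship words
--     sentences = text.split('.')
--     for sentence in sentences:
--         sentence = sentence.strip()
--         if not sentence:
--             continue
--
--         # Check which entities appear in the sentence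
--         entities_in_sentence = []
--         for entity_type, entity_list in entities.items():
--             for entity in entity_list:
--                 if entity in sentence:
--                     entities_in_sentence.append((entity, entity_type))
--
--         # Skip if fewer than 2 entities
--         if len(entities_in_sentence) < 2:
--             continue
--
--         # Find relationship type in sentence
--         relation_type = "mentioned"
--         for rel_type, keywords in relation_patterns.items():
--             if any(keyword in sentence.lower() for keyword in keywords):
--                 relation_type = rel_type
--                 break
--
--         # Create relationships between all pairs of entities in the sentence
--         for i, (entity1, type1) in enumerate(entities_in_sentence):
--             for entity2, type2 in entities_in_sentence[i+1:]:
--                 relationships.append({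
--                     "source": entity1,
--                     "source_type": type1,
--                     "target": entity2,
--                     "target_type": type2,
--                     "type": relation_type,
--                     "sentence": sentence
--                 })
--
--     # Remove duplicate relationships by converting to a dict and back
--     unique_relationships = {}
--     for rel in relationships:
--         key = f"{rel['source']}_{rel['target']}_{rel['type']}"
--         unique_relationships[key] = rel
--
--     return list(unique_relationships.values())
-- ===== SOURCE B (Python) =====
-- RELATION_PATTERNS = [
--     ("cooperation", ["cooperation", "agreement", "partnership", "alliance", "deal", "treaty"]),
--     ("conflict", ["conflict", "tension", "dispute", "war", "confrontation", "clash"]),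
--     ("economic", ["trade", "investment", "economic", "financial", "commerce"]),
--     ("diplomatic", ["diplomatic", "diplomacy", "talks", "negotiation", "meeting"]),
--     ("military", ["military", "defense", "security", "naval", "army", "forces"]),
-- ]
--
--
-- def identify_relationships(text, entities):
--     """Inverted-index variant: pre-clean the sentence list once, then build an
--     entity-major occurrence table (entity -> which sentences it is in), and only
--     afterwards walk the table sentence by sentence, classifying by filtering the
--     pattern list and writing each pair straight into one ordered dict."""
--     sentences = [s for s in (part.strip() for part in text.split('.')) if s]
--     flat = [(entity, entity_type)
--             for entity_type, entity_list in entities.items()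
--             for entity in entity_list]
--     if len(flat) < 2:
--         return []
--
--     # occurrence table, filled entity-major (the transpose of A's traversal)
--     occ = [[] for _ in sentences]
--     for pair in flat:
--         for idx, sentence in enumerate(sentences):
--             if pair[0] in sentence:
--                 occ[idx].append(pair)
--
--     unique = {}
--     for sentence, present in zip(sentences, occ):
--         if len(present) < 2:
--             continue
--         low = sentence.lower()
--         matched = [rel_type for rel_type, keywords in RELATION_PATTERNS
--                    if any(keyword in low for keyword in keywords)]
--         rel_type = matched[0] if matched else "mentioned"
--         stack = list(present)
--         while len(stack) > 1:
--             entity1, type1 = stack.pop(0)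
--             for entity2, type2 in stack:
--                 unique[f"{entity1}_{entity2}_{rel_type}"] = {
--                     "source": entity1,
--                     "source_type": type1,
--                     "target": entity2,
--                     "target_type": type2,
--                     "type": rel_type,
--                     "sentence": sentence,
--                 }
--     return list(unique.values())
-- ===== Notes on version B (the rewrite author's own statement) =====
-- stated objective: alternative
-- what changed: B pre-cleans the sentence list once (strip+drop empties), then builds an inverted occurrence table entity-major (for each entity, mark every sentence containing it) -- the transpose of A's per-sentence nested entity scan -- and finally walks sentences with their precomputed entity lists, classifying by filtering the whole pattern list and taking the first match instead of A's break loop, and writing each pair straight into one ordered dict, eliminating A's intermediate relationships list and its separate build-then-dedup second pass.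
import Mathlib
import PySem

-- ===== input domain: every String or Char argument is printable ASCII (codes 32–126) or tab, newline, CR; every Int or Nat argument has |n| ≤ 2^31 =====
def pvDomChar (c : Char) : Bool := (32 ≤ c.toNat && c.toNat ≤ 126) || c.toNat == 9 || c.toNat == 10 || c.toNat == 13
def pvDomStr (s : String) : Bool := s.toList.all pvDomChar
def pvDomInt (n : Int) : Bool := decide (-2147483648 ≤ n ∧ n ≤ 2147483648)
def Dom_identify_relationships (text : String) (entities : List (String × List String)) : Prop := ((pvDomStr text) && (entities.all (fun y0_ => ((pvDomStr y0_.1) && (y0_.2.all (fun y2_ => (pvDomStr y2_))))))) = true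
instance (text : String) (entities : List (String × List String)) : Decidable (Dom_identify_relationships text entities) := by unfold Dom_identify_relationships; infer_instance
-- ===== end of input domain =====

-- B pre-cleans the sentence list once, builds an entity-major occurrence table (the
-- transpose of A's per-sentence entity scan), classifies by filtering the pattern list,
-- and writes pairs straight into one ordered dict, removing A's intermediate
-- relationships list and separate dedup pass (objective: alternative).


-- shared constant table (pure data, used by both ports)
def relPatterns : List (String × List String) :=
  [("cooperation", ["cooperation", "agreement", "partnership", "alliance", "deal", "treaty"]),
   ("conflict", ["conflict", "tension", "dispute", "war", "confrontation", "clash"]),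
   ("economic", ["trade", "investment", "economic", "financial", "commerce"]),
   ("diplomatic", ["diplomatic", "diplomacy", "talks", "negotiation", "meeting"]),
   ("military", ["military", "defense", "security", "naval", "army", "forces"])]

-- ===== PORT A =====
-- 'for rel_type, keywords in relation_patterns.items(): if any(...): relation_type = rel_type; break'
def relTypeLoopA : List (String × List String) → String → String
  | [], _ => "mentioned"
  | p :: rest, low => if p.2.any (fun kw => PySem.Str.isIn kw low) then p.1 else relTypeLoopA rest low

-- f"{rel['source']}_{rel['target']}_{rel['type']}" ; the keys are always present in rel,
-- so Python's rel[k] equals this getD lookup exactly.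
def keyOfA (rel : List (String × String)) : String :=
  (PySem.Dict.mk rel).getD "source" "" ++ "_" ++ (PySem.Dict.mk rel).getD "target" "" ++ "_" ++ (PySem.Dict.mk rel).getD "type" ""

def identify_relationships (text : String) (entities : List (String × List String)) : List (List (String × String)) :=
  let flattened := entities.foldl (fun acc p => acc ++ p.2) []
  if flattened.length < 2 then []
  else
    let sentences := (PySem.Str.split? text ".").getD []
    let relationships := sentences.foldl (fun acc raw =>
      let sentence := PySem.Str.strip raw
      if sentence = "" then acc
      else
        let ents := entities.foldl (fun acc2 p =>
          p.2.foldl (fun acc3 e => if PySem.Str.isIn e sentence then acc3 ++ [(e, p.1)] else acc3) acc2) []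
        if ents.length < 2 then acc
        else
          let relType := relTypeLoopA relPatterns (PySem.Str.lower sentence)
          (PySem.List.enumerate ents).foldl (fun acc1 ip =>
            (PySem.List.slice ents (some (ip.1 + 1)) none).foldl (fun acc2 q =>
              acc2 ++ [[("source", ip.2.1), ("source_type", ip.2.2), ("target", q.1),
                        ("target_type", q.2), ("type", relType), ("sentence", sentence)]]) acc1) acc) []
    let unique := relationships.foldl (fun d rel => d.insert (keyOfA rel) rel)
      (PySem.Dict.empty : PySem.Dict String (List (String × String)))
    unique.values

-- ===== PORT B =====
-- 'stack = list(present); while len(stack) > 1: (e1,t1) = stack.pop(0); for e2,t2 in stack: unique[...] = {...}'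
def pairLoopB (rt sen : String) :
    List (String × String) → PySem.Dict String (List (String × String)) → PySem.Dict String (List (String × String))
  | [], d => d
  | [_], d => d
  | p :: q :: tail, d =>
      pairLoopB rt sen (q :: tail)
        ((q :: tail).foldl (fun d2 e2 =>
            d2.insert (p.1 ++ "_" ++ e2.1 ++ "_" ++ rt)
              [("source", p.1), ("source_type", p.2), ("target", e2.1),
               ("target_type", e2.2), ("type", rt), ("sentence", sen)]) d)

def identify_relationships_alt (text : String) (entities : List (String × List String)) : List (List (String × String)) :=
  let sentences := (((PySem.Str.split? text ".").getD []).map PySem.Str.strip).filter (fun s => s != "")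
  let flat := entities.flatMap (fun p => p.2.map (fun e => (e, p.1)))
  if flat.length < 2 then []
  else
    -- occurrence table filled entity-major; 'occ[idx].append(pair)' becomes an
    -- elementwise map over 'zip sentences occ' (exact: pure update of one slot per index)
    let occ := flat.foldl
      (fun occ pair => (sentences.zip occ).map (fun sp => if PySem.Str.isIn pair.1 sp.1 then sp.2 ++ [pair] else sp.2))
      (sentences.map (fun _ => ([] : List (String × String))))
    let unique := (sentences.zip occ).foldl (fun d sp =>
      if sp.2.length < 2 then d
      else
        let matched := (relPatterns.filter (fun p => p.2.any (fun kw => PySem.Str.isIn kw (PySem.Str.lower sp.1)))).map Prod.fst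
        pairLoopB (matched.head?.getD "mentioned") sp.1 sp.2 d)
      (PySem.Dict.empty : PySem.Dict String (List (String × String)))
    unique.values

-- ===== PRECONDITION & SPEC =====
def Spec_identify_relationships (text : String) (entities : List (String × List String)) (out : List (List (String × String))) : Prop := out = identify_relationships_alt text entities
instance (text : String) (entities : List (String × List String)) (out : List (List (String × String))) : Decidable (Spec_identify_relationships text entities out) := by unfold Spec_identify_relationships; infer_instance

-- ===== CLAIM (what is proved, stated in full; the proofs are below) =====
def Claim_equal_identify_relationships : Prop := ∀ (text : String) (entities : List (String × List String)), Dom_identify_relationships text entities → Spec_identify_relationships text entities (identify_relationships text entities)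

-- ===== LEMMAS AND PROOFS =====

-- proof-only helpers: a neutral description of the per-sentence work both programs do

def mkRel (p q : String × String) (rt sen : String) : List (String × String) :=
  [("source", p.1), ("source_type", p.2), ("target", q.1),
   ("target_type", q.2), ("type", rt), ("sentence", sen)]

def pairsOf (rt sen : String) : List (String × String) → List (List (String × String))
  | [] => []
  | p :: t => t.map (fun q => mkRel p q rt sen) ++ pairsOf rt sen t

def insRel (d : PySem.Dict String (List (String × String))) (rel : List (String × String)) :
    PySem.Dict String (List (String × String)) := d.insert (keyOfA rel) rel

def entsOf (entities : List (String × List String)) (sentence : String) : List (String × String) :=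
  (entities.flatMap (fun p => p.2.map (fun e => (e, p.1)))).filter
    (fun pair => PySem.Str.isIn pair.1 sentence)

def sentRels (entities : List (String × List String)) (sentence : String) : List (List (String × String)) :=
  if (entsOf entities sentence).length < 2 then []
  else pairsOf (relTypeLoopA relPatterns (PySem.Str.lower sentence)) sentence (entsOf entities sentence)

def relsOf (entities : List (String × List String)) (raw : String) : List (List (String × String)) :=
  if PySem.Str.strip raw = "" then [] else sentRels entities (PySem.Str.strip raw)

theorem foldl_ext {γ α : Type} (f g : γ → α → γ) (h : ∀ a x, f a x = g a x)
    (l : List α) (init : γ) : l.foldl f init = l.foldl g init := by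
  have : f = g := funext fun a => funext fun x => h a x
  rw [this]

theorem flat_length (entities : List (String × List String)) :
    (entities.flatMap (fun p => p.2.map (fun e => (e, p.1)))).length
    = (entities.foldl (fun acc p => acc ++ p.2) []).length := by
  rw [PySem.List.foldl_append_eq_flatMap (fun p => p.2) entities []]
  simp [List.length_flatMap]

-- ===== A side =====

theorem entsA_eq (entities : List (String × List String)) (sentence : String) :
    entities.foldl (fun acc2 p =>
      p.2.foldl (fun acc3 e => if PySem.Str.isIn e sentence then acc3 ++ [(e, p.1)] else acc3) acc2) []
    = entsOf entities sentence := by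
  calc entities.foldl (fun acc2 p =>
        p.2.foldl (fun acc3 e => if PySem.Str.isIn e sentence then acc3 ++ [(e, p.1)] else acc3) acc2) []
      = entities.foldl (fun acc2 p =>
          acc2 ++ (p.2.filter (fun e => PySem.Str.isIn e sentence)).map (fun e => (e, p.1))) [] := by
        apply foldl_ext
        intro acc2 p
        exact PySem.List.foldl_append_if (fun e => PySem.Str.isIn e sentence) (fun e => (e, p.1)) p.2 acc2
    _ = entities.flatMap (fun p =>
          (p.2.filter (fun e => PySem.Str.isIn e sentence)).map (fun e => (e, p.1))) := by
        rw [PySem.List.foldl_append_eq_flatMap]; simp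
    _ = entsOf entities sentence := by
        rw [entsOf, List.filter_flatMap]
        congr 1; funext p
        rw [List.filter_map]
        rfl

theorem loopA_pairs (rt sen : String) (full : List (String × String)) :
    ∀ (suf pre : List (String × String)) (acc : List (List (String × String))),
    full = pre ++ suf →
    (PySem.List.enumerate suf (pre.length : Int)).foldl (fun acc1 ip =>
      (PySem.List.slice full (some (ip.1 + 1)) none).foldl
        (fun acc2 q => acc2 ++ [mkRel ip.2 q rt sen]) acc1) acc
    = acc ++ pairsOf rt sen suf := by
  intro suf
  induction suf with
  | nil => intro pre acc _; simp [PySem.List.enumerate, pairsOf]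
  | cons p suf' ih =>
    intro pre acc hfull
    rw [PySem.List.enumerate_cons, List.foldl_cons]
    have hcast : ((pre.length : Int) + 1) = (((pre ++ [p]).length : Nat) : Int) := by
      simp
    have hslice : PySem.List.slice full (some ((pre.length : Int) + 1)) none = suf' := by
      rw [PySem.List.slice_from full (by positivity)]
      have : ((pre.length : Int) + 1).toNat = pre.length + 1 := by omega
      rw [this, hfull]
      have : pre ++ p :: suf' = (pre ++ [p]) ++ suf' := by simp
      rw [this]
      have hlen : pre.length + 1 = (pre ++ [p]).length := by simp
      rw [hlen, List.drop_left]
    rw [hslice, PySem.List.foldl_append_singleton_eq_map]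
    rw [hcast, ih (pre ++ [p]) _ (by simp [hfull])]
    rw [pairsOf]
    simp

theorem bodyA_eq (entities : List (String × List String)) :
    (fun (acc : List (List (String × String))) (raw : String) =>
      let sentence := PySem.Str.strip raw
      if sentence = "" then acc
      else
        let ents := entities.foldl (fun acc2 p =>
          p.2.foldl (fun acc3 e => if PySem.Str.isIn e sentence then acc3 ++ [(e, p.1)] else acc3) acc2) []
        if ents.length < 2 then acc
        else
          let relType := relTypeLoopA relPatterns (PySem.Str.lower sentence)
          (PySem.List.enumerate ents).foldl (fun acc1 ip =>
            (PySem.List.slice ents (some (ip.1 + 1)) none).foldl (fun acc2 q =>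
              acc2 ++ [[("source", ip.2.1), ("source_type", ip.2.2), ("target", q.1),
                        ("target_type", q.2), ("type", relType), ("sentence", sentence)]]) acc1) acc)
    = fun acc raw => acc ++ relsOf entities raw := by
  funext acc raw
  rw [relsOf, sentRels]
  by_cases h1 : PySem.Str.strip raw = ""
  · simp [h1]
  · simp only [if_neg h1]
    rw [entsA_eq entities (PySem.Str.strip raw)]
    by_cases h2 : (entsOf entities (PySem.Str.strip raw)).length < 2
    · simp [h2]
    · rw [if_neg h2, if_neg h2]
      have := loopA_pairs (relTypeLoopA relPatterns (PySem.Str.lower (PySem.Str.strip raw)))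
        (PySem.Str.strip raw) (entsOf entities (PySem.Str.strip raw))
        (entsOf entities (PySem.Str.strip raw)) [] acc (by simp)
      simpa [mkRel] using this

theorem a_characterization (text : String) (entities : List (String × List String)) :
    identify_relationships text entities =
    if (entities.foldl (fun acc p => acc ++ p.2) []).length < 2 then []
    else ((((PySem.Str.split? text ".").getD []).flatMap (relsOf entities)).foldl insRel
      (PySem.Dict.empty : PySem.Dict String (List (String × String)))).values := by
  rw [identify_relationships]
  simp only []
  by_cases h : (entities.foldl (fun acc p => acc ++ p.2) []).length < 2
  · rw [if_pos h, if_pos h]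
  · rw [if_neg h, if_neg h]
    rw [bodyA_eq entities]
    rw [PySem.List.foldl_append_eq_flatMap (relsOf entities) _ []]
    rw [List.nil_append]
    rfl

-- ===== B side =====

theorem zip_self_map {α β : Type} (l : List α) (f : α → β) :
    l.zip (l.map f) = l.map (fun x => (x, f x)) := by
  induction l with
  | nil => rfl
  | cons x t ih => simp [ih]

theorem occ_inv (sentences : List String) (flat : List (String × String)) :
    ∀ (g : String → List (String × String)),
    flat.foldl
      (fun occ pair => (sentences.zip occ).map (fun sp => if PySem.Str.isIn pair.1 sp.1 then sp.2 ++ [pair] else sp.2))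
      (sentences.map g)
    = sentences.map (fun s => g s ++ flat.filter (fun pair => PySem.Str.isIn pair.1 s)) := by
  induction flat with
  | nil => intro g; simp
  | cons pair rest ih =>
    intro g
    rw [List.foldl_cons, zip_self_map, List.map_map]
    have hstep : ((fun sp : String × List (String × String) =>
        if PySem.Str.isIn pair.1 sp.1 then sp.2 ++ [pair] else sp.2) ∘ fun x => (x, g x))
        = fun s => if PySem.Str.isIn pair.1 s then g s ++ [pair] else g s := by
      funext s; rfl
    rw [hstep, ih]
    apply List.map_congr_left
    intro s _
    simp only [List.filter_cons, PySem.Str.isIn_eq]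
    by_cases hc : PySem.Chars.isIn pair.1.toList s.toList = true
    · simp [hc]
    · simp [hc]

theorem relType_filter (low : String) (ps : List (String × List String)) :
    (((ps.filter (fun p => p.2.any (fun kw => PySem.Str.isIn kw low))).map Prod.fst).head?).getD "mentioned"
    = relTypeLoopA ps low := by
  induction ps with
  | nil => rfl
  | cons p rest ih =>
    rw [relTypeLoopA, List.filter_cons]
    by_cases hc : (p.2.any fun kw => PySem.Str.isIn kw low) = true
    · simp only [hc, if_true, List.map_cons, List.head?_cons, Option.getD_some]
    · rw [Bool.not_eq_true] at hc
      simp only [hc, Bool.false_eq_true, if_false]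
      exact ih

theorem pairLoopB_eq (rt sen : String) (l : List (String × String))
    (d : PySem.Dict String (List (String × String))) :
    pairLoopB rt sen l d = (pairsOf rt sen l).foldl insRel d := by
  induction l generalizing d with
  | nil => simp [pairLoopB, pairsOf]
  | cons p t ih =>
    cases t with
    | nil => simp [pairLoopB, pairsOf]
    | cons q tail =>
      rw [pairLoopB, pairsOf, List.foldl_append, ih, List.foldl_map]
      congr 1

theorem flatMap_relsOf (entities : List (String × List String)) (raws : List String) :
    (((raws.map PySem.Str.strip).filter (fun s => s != "")).flatMap (sentRels entities))
    = raws.flatMap (relsOf entities) := by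
  induction raws with
  | nil => rfl
  | cons raw rest ih =>
    rw [List.map_cons, List.filter_cons, List.flatMap_cons, relsOf]
    by_cases h : PySem.Str.strip raw = ""
    · simp only [h, if_pos, bne_self_eq_false, Bool.false_eq_true, ite_false,
        List.nil_append, ih]
    · have hb : (PySem.Str.strip raw != "") = true := by simp [h]
      rw [hb, if_pos rfl, List.flatMap_cons, ih, if_neg h]

theorem alt_characterization (text : String) (entities : List (String × List String)) :
    identify_relationships_alt text entities =
    if (entities.flatMap (fun p => p.2.map (fun e => (e, p.1)))).length < 2 then []
    else ((((PySem.Str.split? text ".").getD []).flatMap (relsOf entities)).foldl insRel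
      (PySem.Dict.empty : PySem.Dict String (List (String × String)))).values := by
  rw [identify_relationships_alt]
  simp only []
  by_cases h : (entities.flatMap (fun p => p.2.map (fun e => (e, p.1)))).length < 2
  · rw [if_pos h, if_pos h]
  · rw [if_neg h, if_neg h]
    apply congrArg
    rw [occ_inv _ _ (fun _ => [])]
    simp only [List.nil_append]
    rw [zip_self_map, List.foldl_map, ← flatMap_relsOf entities, List.foldl_flatMap]
    have hb2 : ∀ (d : PySem.Dict String (List (String × String))) (s : String),
        (if ((entsOf entities s).length < 2) then d
         else pairLoopB ((((relPatterns.filter (fun p => p.2.any (fun kw => PySem.Str.isIn kw (PySem.Str.lower s)))).map Prod.fst).head?).getD "mentioned") s (entsOf entities s) d)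
        = (sentRels entities s).foldl insRel d := by
      intro d s
      rw [sentRels]
      by_cases h2 : (entsOf entities s).length < 2
      · simp [h2]
      · rw [if_neg h2, if_neg h2, pairLoopB_eq, relType_filter]
    exact foldl_ext _ _ (fun d s => hb2 d s) _ _

-- ===== VERDICT (by name: the statement is the Claim_ definition above) =====
theorem identify_relationships_spec : Claim_equal_identify_relationships := by
  intro text entities _hdom
  unfold Spec_identify_relationships
  rw [a_characterization, alt_characterization, flat_length]
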